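-- pv_equiv track=rewrite | github.com/pcsteppan/python-puzzles | party/main.py | findGreatestOverlapOpt
-- ===== SOURCE A (Python) =====
-- def findGreatestOverlapOpt(spans):
--     """
--     optimal solution:
--     returns a discrete moment of one-dimensional space where
--     the most spans overlap
--
--     start times increment, end times decrement
--
--     >>> findGreatestOverlapOpt([(0,2), (1, 2), (1,3)])
--     1
--     >>> findGreatestOverlapOpt([(6, 7), (7, 9), (10, 11), (10, 12), (8, 10),\
--         (9, 11), (6, 8)])
--     10
--     """
--
--     # sort spans by start times
--     new_spans = []
--     [new_spans.extend([(span_start, 1), (span_end, -1)])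
--         for span_start, span_end in spans]
--
--     sorted_spans = sorted(new_spans, key=lambda x: x[0])
--
--     max_moment = max_overlaps = current_overlaps = 0
--     for moment, status in sorted_spans:
--         current_overlaps += status
--         if current_overlaps > max_overlaps:
--             max_overlaps = current_overlaps
--             max_moment = moment
--
--     return max_moment
-- ===== SOURCE B (Python) =====
-- def findGreatestOverlapOpt(spans):
--     # Divide and conquer: over the sorted event sequence, recursively compute the
--     # triple (total sum, max nonempty-prefix sum, moment of its first occurrence)
--     # for each half and merge; left half wins ties, so the first maximum is kept.
--     events = sorted([p for s in spans for p in ((s[0], 1), (s[1], -1))],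
--                     key=lambda x: x[0])
--
--     def solve(lo, hi):
--         if hi - lo == 1:
--             moment, status = events[lo]
--             return (status, status, moment)
--         mid = (lo + hi) // 2
--         tl, bl, ml = solve(lo, mid)
--         tr, br, mr = solve(mid, hi)
--         if tl + br > bl:
--             return (tl + tr, tl + br, mr)
--         return (tl + tr, bl, ml)
--
--     if not events:
--         return 0
--     _, best, moment = solve(0, len(events))
--     return moment if best > 0 else 0
-- ===== Notes on version B (the rewrite author's own statement) =====
-- stated objective: alternative
-- what changed: Replaces A's linear accumulator sweep over the sorted events with a divide-and-conquer that recursively computes (total sum, max nonempty-prefix sum, moment of its first occurrence) for each half and merges, left half winning ties.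
import Mathlib
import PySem

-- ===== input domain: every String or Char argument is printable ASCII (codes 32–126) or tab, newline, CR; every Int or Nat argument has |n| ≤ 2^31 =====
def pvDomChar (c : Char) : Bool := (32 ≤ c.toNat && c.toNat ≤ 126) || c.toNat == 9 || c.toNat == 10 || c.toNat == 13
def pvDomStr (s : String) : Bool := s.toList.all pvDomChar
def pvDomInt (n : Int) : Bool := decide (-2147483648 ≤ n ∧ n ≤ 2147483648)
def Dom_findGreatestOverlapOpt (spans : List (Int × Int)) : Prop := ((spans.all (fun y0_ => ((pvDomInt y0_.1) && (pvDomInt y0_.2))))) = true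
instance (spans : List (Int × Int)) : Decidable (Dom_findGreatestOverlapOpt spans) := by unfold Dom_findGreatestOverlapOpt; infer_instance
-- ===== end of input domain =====

-- B replaces A's linear accumulator sweep over the sorted events with a divide-and-conquer
-- computing (total, max nonempty-prefix sum, moment of its first occurrence) per half
-- (alternative decomposition, same cost).

-- ===== PORT A =====
def findGreatestOverlapOpt (spans : List (Int × Int)) : Int :=
  let new_spans := spans.foldl (fun acc span => acc ++ [(span.1, 1), (span.2, -1)]) []
  let sorted_spans := PySem.List.sorted new_spans (fun x => x.1)
  let r := sorted_spans.foldl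
    (fun (st : Int × Int × Int) ms =>
      let cur := st.2.2 + ms.2
      if cur > st.2.1 then (ms.1, cur, cur) else (st.1, st.2.1, cur))
    (0, 0, 0)
  r.1

-- ===== PORT B =====
-- Source B's solve(lo, hi) works on the slice events[lo:hi]; here the slice is passed directly
-- (take/drop at mid). The fuel argument only makes the recursion total; with
-- fuel = events.length it is never exhausted.
def pvSolveB : Nat → List (Int × Int) → Int × Int × Int
  | _, [e] => (e.2, e.2, e.1)
  | fuel + 1, es =>
      let mid := es.length / 2
      let l := pvSolveB fuel (es.take mid)
      let r := pvSolveB fuel (es.drop mid)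
      if l.1 + r.2.1 > l.2.1 then (l.1 + r.1, l.1 + r.2.1, r.2.2)
      else (l.1 + r.1, l.2.1, l.2.2)
  | 0, _ => (0, 0, 0)   -- unreachable: fuel suffices and the empty slice never occurs

def findGreatestOverlapOpt_alt (spans : List (Int × Int)) : Int :=
  let events := PySem.List.sorted (spans.flatMap (fun s => [(s.1, 1), (s.2, -1)])) (fun x => x.1)
  match events with
  | [] => 0
  | _ =>
    let r := pvSolveB events.length events
    if r.2.1 > 0 then r.2.2 else 0

-- ===== PRECONDITION & SPEC =====
def Spec_findGreatestOverlapOpt (spans : List (Int × Int)) (out : Int) : Prop := out = findGreatestOverlapOpt_alt spans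
instance (spans : List (Int × Int)) (out : Int) : Decidable (Spec_findGreatestOverlapOpt spans out) := by unfold Spec_findGreatestOverlapOpt; infer_instance

-- ===== CLAIM (what is proved, stated in full; the proofs are below) =====
def Claim_equal_findGreatestOverlapOpt : Prop := ∀ (spans : List (Int × Int)), Dom_findGreatestOverlapOpt spans → Spec_findGreatestOverlapOpt spans (findGreatestOverlapOpt spans)

-- ===== LEMMAS AND PROOFS =====

-- total of the status column
def sumSt : List (Int × Int) → Int
  | [] => 0
  | e :: t => e.2 + sumSt t

-- (max nonempty-prefix running sum starting from c, moment of its FIRST occurrence)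
def bestM (c : Int) : List (Int × Int) → Option (Int × Int)
  | [] => none
  | e :: t =>
      match bestM (c + e.2) t with
      | none => some (c + e.2, e.1)
      | some (b, m) => if b > c + e.2 then some (b, m) else some (c + e.2, e.1)

theorem sumSt_append (L R : List (Int × Int)) : sumSt (L ++ R) = sumSt L + sumSt R := by
  induction L with
  | nil => simp [sumSt]
  | cons e t ih => simp [sumSt, ih]; ring

theorem bestM_cons_none {c : Int} {e : Int × Int} {t : List (Int × Int)}
    (h : bestM (c + e.2) t = none) : bestM c (e :: t) = some (c + e.2, e.1) := by
  simp [bestM, h]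

theorem bestM_cons_some_eq {c : Int} {e : Int × Int} {t : List (Int × Int)} {b m : Int}
    (h : bestM (c + e.2) t = some (b, m)) :
    bestM c (e :: t) = if b > c + e.2 then some (b, m) else some (c + e.2, e.1) := by
  simp [bestM, h]

theorem bestM_cons_some (c : Int) (e : Int × Int) (t : List (Int × Int)) :
    ∃ p, bestM c (e :: t) = some p := by
  cases h : bestM (c + e.2) t with
  | none => exact ⟨(c + e.2, e.1), bestM_cons_none h⟩
  | some p =>
      by_cases hb : p.1 > c + e.2
      · exact ⟨p, by rw [bestM_cons_some_eq (b := p.1) (m := p.2) (by simpa using h), if_pos hb]⟩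
      · exact ⟨(c + e.2, e.1), by rw [bestM_cons_some_eq (b := p.1) (m := p.2) (by simpa using h), if_neg hb]⟩

-- shift: starting the running sum at c adds c to the best value and keeps the moment
theorem bestM_shift (R : List (Int × Int)) : ∀ c,
    bestM c R = (bestM 0 R).map (fun p => (p.1 + c, p.2)) := by
  induction R with
  | nil => intro c; simp [bestM]
  | cons e t ih =>
      intro c
      simp only [bestM]
      rw [ih (c + e.2), ih (0 + e.2)]
      cases h : bestM 0 t with
      | none => simp; omega
      | some p =>
          simp only [Option.map_some]
          by_cases hb : p.1 + (0 + e.2) > 0 + e.2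
          · rw [if_pos hb, if_pos (by omega)]; simp; omega
          · rw [if_neg hb, if_neg (by omega)]; simp; omega

-- merge law for bestM over an append (left half wins ties)
theorem bestM_merge (L : List (Int × Int)) : ∀ (R : List (Int × Int)) c bl ml br mr,
    R ≠ [] →
    bestM c L = some (bl, ml) →
    bestM (c + sumSt L) R = some (br, mr) →
    bestM c (L ++ R) = some (if br > bl then (br, mr) else (bl, ml)) := by
  induction L with
  | nil => intro R c bl ml br mr _ hL; simp [bestM] at hL
  | cons e t ih =>
      intro R c bl ml br mr hR hL hRR
      cases t with
      | nil =>
          rw [bestM_cons_none rfl, Option.some.injEq, Prod.mk.injEq] at hL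
          obtain ⟨hLb, hLm⟩ := hL
          subst hLb; subst hLm
          have hsum : c + sumSt [e] = c + e.2 := by simp [sumSt]
          rw [hsum] at hRR
          rw [List.cons_append, List.nil_append, bestM_cons_some_eq hRR]
          by_cases hb : br > c + e.2
          · rw [if_pos hb, if_pos hb]
          · rw [if_neg hb, if_neg hb]
      | cons e2 t2 =>
          obtain ⟨⟨bl', ml'⟩, ht⟩ := bestM_cons_some (c + e.2) e2 t2
          have hsum : c + sumSt (e :: e2 :: t2) = (c + e.2) + sumSt (e2 :: t2) := by
            simp [sumSt]; ring
          rw [hsum] at hRR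
          have hmid := ih R (c + e.2) bl' ml' br mr hR ht hRR
          rw [bestM_cons_some_eq ht] at hL
          by_cases h1 : br > bl'
          · rw [if_pos h1] at hmid
            rw [List.cons_append, bestM_cons_some_eq hmid]
            by_cases h2 : bl' > c + e.2
            · rw [if_pos h2, Option.some.injEq, Prod.mk.injEq] at hL
              obtain ⟨hLb, hLm⟩ := hL
              subst hLb; subst hLm
              rw [if_pos (show br > c + e.2 by omega), if_pos h1]
            · rw [if_neg h2, Option.some.injEq, Prod.mk.injEq] at hL
              obtain ⟨hLb, hLm⟩ := hL
              subst hLb; subst hLm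
              by_cases h3 : br > c + e.2
              · rw [if_pos h3, if_pos h3]
              · rw [if_neg h3, if_neg h3]
          · rw [if_neg h1] at hmid
            rw [List.cons_append, bestM_cons_some_eq hmid]
            by_cases h2 : bl' > c + e.2
            · rw [if_pos h2, Option.some.injEq, Prod.mk.injEq] at hL
              obtain ⟨hLb, hLm⟩ := hL
              subst hLb; subst hLm
              rw [if_pos h2, if_neg h1]
            · rw [if_neg h2, Option.some.injEq, Prod.mk.injEq] at hL
              obtain ⟨hLb, hLm⟩ := hL
              subst hLb; subst hLm
              rw [if_neg (show ¬ bl' > c + e.2 by omega),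
                  if_neg (show ¬ br > c + e.2 by omega)]

-- A's fold, characterised by bestM
theorem afold_char (E : List (Int × Int)) : ∀ mm mo co,
    (E.foldl (fun (st : Int × Int × Int) ms =>
        let cur := st.2.2 + ms.2
        if cur > st.2.1 then (ms.1, cur, cur) else (st.1, st.2.1, cur)) (mm, mo, co)).1
      = match bestM co E with
        | none => mm
        | some (b, m) => if b > mo then m else mm := by
  induction E with
  | nil => intro mm mo co; simp [bestM]
  | cons e t ih =>
      intro mm mo co
      rw [List.foldl_cons]
      have hstep : (let cur := (mm, mo, co).2.2 + e.2;
          if cur > (mm, mo, co).2.1 then (e.1, cur, cur) else ((mm, mo, co).1, (mm, mo, co).2.1, cur))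
        = if co + e.2 > mo then (e.1, co + e.2, co + e.2) else (mm, mo, co + e.2) := rfl
      rw [hstep]
      by_cases hc : co + e.2 > mo
      · rw [if_pos hc, ih]
        cases h : bestM (co + e.2) t with
        | none => rw [bestM_cons_none h]; simp [hc]
        | some p =>
            obtain ⟨b', m'⟩ := p
            rw [bestM_cons_some_eq h]
            by_cases hb : b' > co + e.2
            · rw [if_pos hb]
              simp [hb, show b' > mo by omega]
            · rw [if_neg hb]
              simp [hb, hc]
      · rw [if_neg hc, ih]
        cases h : bestM (co + e.2) t with
        | none => rw [bestM_cons_none h]; simp [hc]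
        | some p =>
            obtain ⟨b', m'⟩ := p
            rw [bestM_cons_some_eq h]
            by_cases hb : b' > co + e.2
            · rw [if_pos hb]
            · rw [if_neg hb]
              simp [hc, show ¬ b' > mo by omega]

-- correctness of the divide-and-conquer: given enough fuel it computes (sumSt, bestM 0)
theorem pvSolveB_correct : ∀ (fuel : Nat) (es : List (Int × Int)) (b m : Int),
    es.length ≤ fuel + 1 → bestM 0 es = some (b, m) →
    pvSolveB fuel es = (sumSt es, b, m) := by
  intro fuel
  induction fuel with
  | zero =>
      intro es b m hlen hb
      match es, hlen with
      | [], _ => simp [bestM] at hb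
      | [e], _ =>
          simp only [bestM] at hb
          cases hb
          simp [pvSolveB, sumSt]
  | succ f ih =>
      intro es b m hlen hb
      match es with
      | [] => simp [bestM] at hb
      | [e] =>
          simp only [bestM] at hb
          cases hb
          simp [pvSolveB, sumSt]
      | e1 :: e2 :: t =>
          have hn : (e1 :: e2 :: t).length = t.length + 2 := by simp
          set n : Nat := t.length + 2 with hn2
          have hmid1 : 1 ≤ n / 2 := by omega
          have hmidn : n / 2 < n := by omega
          set L := (e1 :: e2 :: t).take (n / 2) with hLdef
          set R := (e1 :: e2 :: t).drop (n / 2) with hRdef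
          have hLlen : L.length = n / 2 := by
            rw [hLdef, List.length_take]; omega
          have hRlen : R.length = n - n / 2 := by
            rw [hRdef, List.length_drop]; omega
          have hLne : L ≠ [] := by
            intro h; rw [h] at hLlen; simp at hLlen; omega
          have hRne : R ≠ [] := by
            intro h; rw [h] at hRlen; simp at hRlen; omega
          obtain ⟨eL, tL, hLc⟩ := List.exists_cons_of_ne_nil hLne
          obtain ⟨eR, tR, hRc⟩ := List.exists_cons_of_ne_nil hRne
          obtain ⟨⟨bl, ml⟩, hbl'⟩ := bestM_cons_some 0 eL tL
          have hbl : bestM 0 L = some (bl, ml) := by rw [hLc]; exact hbl'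
          obtain ⟨⟨br0, mr⟩, hbr0'⟩ := bestM_cons_some 0 eR tR
          have hbr0 : bestM 0 R = some (br0, mr) := by rw [hRc]; exact hbr0'
          have hbrc : bestM (0 + sumSt L) R = some (br0 + sumSt L, mr) := by
            rw [bestM_shift, hbr0]; simp
          have hmerge := bestM_merge L R 0 bl ml (br0 + sumSt L) mr hRne hbl hbrc
          have hLR : L ++ R = e1 :: e2 :: t := List.take_append_drop _ _
          rw [hLR] at hmerge
          rw [hmerge] at hb
          have ihL := ih L bl ml (by omega) hbl
          have ihR := ih R br0 mr (by omega) hbr0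
          show pvSolveB (f + 1) (e1 :: e2 :: t) = (sumSt (e1 :: e2 :: t), b, m)
          rw [pvSolveB]
          simp only [hn, ← hLdef, ← hRdef, ihL, ihR]
          have hsum : sumSt L + sumSt R = sumSt (e1 :: e2 :: t) := by
            rw [← sumSt_append, hLR]
          by_cases hcmp : sumSt L + br0 > bl
          · rw [if_pos hcmp]
            rw [if_pos (by omega)] at hb
            cases hb
            rw [hsum, Int.add_comm (sumSt L) br0]
          · rw [if_neg hcmp]
            rw [if_neg (by omega)] at hb
            cases hb
            rw [hsum]
          · intro e he
            simp at he

-- ===== VERDICT (by name: the statement is the Claim_ definition above) =====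
theorem findGreatestOverlapOpt_spec : Claim_equal_findGreatestOverlapOpt := by
  intro spans _
  unfold Spec_findGreatestOverlapOpt findGreatestOverlapOpt findGreatestOverlapOpt_alt
  simp only [PySem.List.foldl_append_eq_flatMap, List.nil_append]
  set E := PySem.List.sorted (spans.flatMap (fun s => [(s.1, 1), (s.2, -1)])) (fun x => x.1) with hE
  rw [afold_char E 0 0 0]
  cases hEc : E with
  | nil => simp [bestM]
  | cons e t =>
      obtain ⟨⟨b, m⟩, hb⟩ := bestM_cons_some 0 e t
      rw [hb]
      rw [pvSolveB_correct (e :: t).length (e :: t) b m (by omega) hb]
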